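-- pv_equiv track=rewrite | github.com/Chr1Z93/AdventOfCode2023 | Day07/solution2.py | getCardCounts
-- ===== SOURCE A (Python) =====
-- cardList = ["A", "K", "Q", "T", "9", "8", "7", "6", "5", "4", "3", "2", "J"]
--
-- def getCardCounts(hand):
--     if hand == "JJJJJ":
--         return [5]
--
--     cardCounts = []
--     jokerCount = 0
--     for c in cardList:
--         count = hand.count(c)
--         if c == "J":
--             jokerCount = count
--         elif count != 0:
--             cardCounts.append(count)
--     cardCounts.sort(reverse=True)
--     cardCounts[0] = cardCounts[0] + jokerCount
--     return cardCounts
-- ===== SOURCE B (Python) =====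
-- def getCardCounts(hand):
--     if hand == "JJJJJ":
--         return [5]
--
--     counts = []
--     jokerCount = 0
--     rest = list(hand)
--     while rest:
--         c = rest[0]
--         n = len(rest)
--         rest = [x for x in rest if x != c]
--         n -= len(rest)
--         if c == "J":
--             jokerCount = n
--         elif c in "AKQT98765432":
--             counts.append(n)
--     counts.sort(reverse=True)
--     counts[0] = counts[0] + jokerCount
--     return counts
-- ===== Notes on version B (the rewrite author's own statement) =====
-- stated objective: alternative
-- what changed: A scans the fixed 13-card table calling hand.count once per card; B never consults the card table per pass: it repeatedly consumes the hand itself, extracting its first character, removing all of its occurrences (the length drop is the count) and recursing on the shrunken remainder, then sorts descending and adds jokers to the top count.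
import Mathlib
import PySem

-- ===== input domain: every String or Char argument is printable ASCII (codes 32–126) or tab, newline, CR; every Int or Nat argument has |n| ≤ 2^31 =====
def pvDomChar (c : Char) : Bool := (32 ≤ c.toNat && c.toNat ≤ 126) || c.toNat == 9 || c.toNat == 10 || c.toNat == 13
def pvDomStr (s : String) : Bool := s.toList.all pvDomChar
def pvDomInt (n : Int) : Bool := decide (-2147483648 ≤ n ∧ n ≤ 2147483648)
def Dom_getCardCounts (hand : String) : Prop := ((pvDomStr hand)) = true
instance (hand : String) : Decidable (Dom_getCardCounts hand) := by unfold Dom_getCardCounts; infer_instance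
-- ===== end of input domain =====

-- B is a different algorithm: instead of A's 13 passes over the hand (one str.count per card of
-- the fixed card list), B repeatedly extracts the first character of the (shrinking) hand,
-- removes all of its occurrences and records the removed count, then sorts and adds jokers.


-- ===== PORT A =====
def cardStrings : List String := ["A", "K", "Q", "T", "9", "8", "7", "6", "5", "4", "3", "2", "J"]

def getCardCounts (hand : String) : List Int :=
  if hand = "JJJJJ" then [5]
  else
    -- state: (cardCounts, jokerCount); one hand.count per card of the card list
    let st := cardStrings.foldl (fun (st : List Int × Int) c =>
        let count : Int := (PySem.Str.count hand c : Int)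
        if c = "J" then (st.1, count)
        else if count ≠ 0 then (st.1 ++ [count], st.2) else st) ([], 0)
    let s := PySem.List.sorted st.1 (fun x => x) true
    match s with
    | [] => []            -- Python raises IndexError (cardCounts[0]) here; excluded by Pre_
    | h :: t => (h + st.2) :: t

-- ===== PORT B =====
def nonJChars : List Char := ['A', 'K', 'Q', 'T', '9', '8', '7', '6', '5', '4', '3', '2']

-- the while loop: c = rest[0]; strip all occurrences of c from rest; n = how many were removed
def stripGo : List Char → List Int → Int → List Int × Int
  | [], counts, jokerCount => (counts, jokerCount)
  | c :: t, counts, jokerCount =>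
    let rest := (c :: t).filter (fun x => decide (x ≠ c))
    let n : Int := ((c :: t).length : Int) - (rest.length : Int)
    if c = 'J' then stripGo rest counts n
    else if c ∈ nonJChars then stripGo rest (counts ++ [n]) jokerCount
    else stripGo rest counts jokerCount
  termination_by rest _ _ => rest.length
  decreasing_by
    all_goals
      simp only [List.filter_cons, ne_eq, not_true_eq_false, decide_false]
      exact Nat.lt_succ_of_le (List.length_filter_le _ t)

def getCardCounts_alt (hand : String) : List Int :=
  if hand = "JJJJJ" then [5]
  else
    let st := stripGo hand.toList [] 0
    let counts := PySem.List.sorted st.1 (fun x => x) true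
    match counts with
    | [] => []            -- Python raises IndexError (counts[0]) here; excluded by Pre_
    | h :: t => (h + st.2) :: t

-- ===== PRECONDITION & SPEC =====
-- Pre_ excludes exactly the inputs on which the Python A raises IndexError (cardCounts[0] on an
-- empty list): hands other than "JJJJJ" containing no non-joker card character; Python B raises
-- IndexError on exactly the same inputs.
def Pre_getCardCounts (hand : String) : Prop :=
  hand = "JJJJJ" ∨ hand.toList.any (fun ch => ch ∈ ['A', 'K', 'Q', 'T', '9', '8', '7', '6', '5', '4', '3', '2']) = true
instance (hand : String) : Decidable (Pre_getCardCounts hand) := by unfold Pre_getCardCounts; infer_instance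

def pvWitness_getCardCounts : String := "AAJ34"

def Spec_getCardCounts (hand : String) (out : List Int) : Prop := out = getCardCounts_alt hand
instance (hand : String) (out : List Int) : Decidable (Spec_getCardCounts hand out) := by unfold Spec_getCardCounts; infer_instance

-- ===== CLAIM (what is proved, stated in full; the proofs are below) =====
def Claim_equal_getCardCounts : Prop := ∀ (hand : String), Dom_getCardCounts hand → Pre_getCardCounts hand → Spec_getCardCounts hand (getCardCounts hand)

-- ===== LEMMAS AND PROOFS =====

-- removing every occurrence of c shortens the list by exactly its count of c
theorem pvStripCount (l : List Char) (c : Char) :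
    l.length - (l.filter (fun x => decide (x ≠ c))).length = l.count c := by
  induction l with
  | nil => simp
  | cons h t ih =>
    by_cases hc : h = c <;>
      simp [hc, ← ih, Nat.sub_add_comm (List.length_filter_le _ t)]

-- the loop invariant: stripGo appends, in first-occurrence order, the count of each distinct
-- non-joker card character of l, and ends with l's joker count (or the incoming one if no 'J')
theorem pvStripGoAux : ∀ (N : Nat) (l : List Char), l.length ≤ N → ∀ (counts : List Int) (j : Int),
    ∃ ds : List Char, ds.Nodup ∧ (∀ x, x ∈ ds ↔ x ∈ l ∧ x ∈ nonJChars) ∧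
      stripGo l counts j
        = (counts ++ ds.map (fun c => (l.count c : Int)),
           if 'J' ∈ l then (l.count 'J' : Int) else j) := by
  intro N
  induction N with
  | zero =>
    intro l hl counts j
    have h0 : l = [] := List.eq_nil_of_length_eq_zero (Nat.le_zero.mp hl)
    subst h0
    exact ⟨[], by simp, by simp, by simp [stripGo]⟩
  | succ N ih =>
    intro l hl counts j
    match l with
    | [] => exact ⟨[], by simp, by simp, by simp [stripGo]⟩
    | c :: t =>
      set r := t.filter (fun x => decide (x ≠ c)) with hr
      have hrt : (c :: t).filter (fun x => decide (x ≠ c)) = r := by simp [hr]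
      have hlen : r.length ≤ N := le_trans (List.length_filter_le _ t) (Nat.succ_le_succ_iff.mp hl)
      have hcnt : ∀ x, x ≠ c → r.count x = (c :: t).count x := by
        intro x hx
        rw [hr, List.count_filter (by simp [hx])]
        simp [List.count_cons]
        exact fun h => hx h.symm
      have hmemr : ∀ x, x ∈ r ↔ (x ∈ t ∧ x ≠ c) := by
        intro x; simp [hr]
      have hn : ((c :: t).length : Int) - (r.length : Int) = ((c :: t).count c : Int) := by
        have h1 := pvStripCount (c :: t) c
        have h2 := List.length_filter_le (fun x => decide (x ≠ c)) (c :: t)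
        rw [hrt] at h1 h2
        omega
      by_cases hJ : c = 'J'
      · -- branch c == "J": jokerCount = n
        subst hJ
        have hstep : stripGo ('J' :: t) counts j
            = stripGo r counts ((('J' :: t).length : Int) - (r.length : Int)) := by
          rw [stripGo]; simp only [hrt]; simp
        obtain ⟨ds, hnd, hmem, heq⟩ := ih r hlen counts ((('J' :: t).length : Int) - (r.length : Int))
        have hJr : 'J' ∉ r := by
          intro h; exact ((hmemr 'J').mp h).2 rfl
        refine ⟨ds, hnd, ?_, ?_⟩
        · intro x
          rw [hmem x, hmemr x]
          constructor
          · rintro ⟨⟨hxl, _⟩, hxn⟩; exact ⟨List.mem_cons_of_mem 'J' hxl, hxn⟩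
          · rintro ⟨hxl, hxn⟩
            have hxc : x ≠ 'J' := by rintro rfl; revert hxn; decide
            rcases List.mem_cons.mp hxl with h | h
            · exact absurd h hxc
            · exact ⟨⟨h, hxc⟩, hxn⟩
        · rw [hstep, heq]
          refine Prod.ext ?_ ?_
          · show counts ++ ds.map (fun x => (r.count x : Int)) = counts ++ _
            congr 1
            refine List.map_congr_left ?_
            intro x hx
            have hxc : x ≠ 'J' := ((hmemr x).mp ((hmem x).mp hx).1).2
            rw [hcnt x hxc]
          · show (if 'J' ∈ r then (r.count 'J' : Int) else _) = _
            rw [if_neg hJr, if_pos List.mem_cons_self, hn]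
      · by_cases hc : c ∈ nonJChars
        · -- branch c in the card list: append the count
          have hstep : stripGo (c :: t) counts j
              = stripGo r (counts ++ [((c :: t).length : Int) - (r.length : Int)]) j := by
            rw [stripGo]; simp only [hrt]; rw [if_neg hJ, if_pos hc]
          obtain ⟨ds, hnd, hmem, heq⟩ := ih r hlen (counts ++ [((c :: t).length : Int) - (r.length : Int)]) j
          have hcnds : c ∉ ds := by
            intro h; exact ((hmemr c).mp ((hmem c).mp h).1).2 rfl
          have hJc : ('J' : Char) ≠ c := fun h => hJ h.symm
          refine ⟨c :: ds, List.nodup_cons.mpr ⟨hcnds, hnd⟩, ?_, ?_⟩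
          · intro x
            rw [List.mem_cons, hmem x, hmemr x]
            constructor
            · rintro (rfl | ⟨⟨hxl, _⟩, hxn⟩)
              · exact ⟨List.mem_cons_self, hc⟩
              · exact ⟨List.mem_cons_of_mem c hxl, hxn⟩
            · rintro ⟨hxl, hxn⟩
              by_cases hxc : x = c
              · exact Or.inl hxc
              · rcases List.mem_cons.mp hxl with h | h
                · exact absurd h hxc
                · exact Or.inr ⟨⟨h, hxc⟩, hxn⟩
          · rw [hstep, heq]
            refine Prod.ext ?_ ?_
            · show counts ++ [_] ++ ds.map (fun x => (r.count x : Int)) = counts ++ _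
              rw [List.append_assoc]
              congr 1
              rw [List.map_cons, ← hn, List.singleton_append]
              congr 1
              refine List.map_congr_left ?_
              intro x hx
              have hxc : x ≠ c := ((hmemr x).mp ((hmem x).mp hx).1).2
              rw [hcnt x hxc]
            · show (if 'J' ∈ r then (r.count 'J' : Int) else j) = _
              have hJmem : 'J' ∈ r ↔ 'J' ∈ c :: t := by
                rw [hmemr 'J', List.mem_cons]
                exact ⟨fun h => Or.inr h.1, fun h => ⟨h.resolve_left hJc, hJc⟩⟩
              by_cases hJl : 'J' ∈ c :: t
              · rw [if_pos (hJmem.mpr hJl), if_pos hJl, hcnt 'J' hJc]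
              · rw [if_neg (fun h => hJl (hJmem.mp h)), if_neg hJl]
        · -- branch: not a card character at all; nothing recorded
          have hstep : stripGo (c :: t) counts j = stripGo r counts j := by
            rw [stripGo]; simp only [hrt]; rw [if_neg hJ]; exact if_neg hc
          obtain ⟨ds, hnd, hmem, heq⟩ := ih r hlen counts j
          have hJc : ('J' : Char) ≠ c := fun h => hJ h.symm
          refine ⟨ds, hnd, ?_, ?_⟩
          · intro x
            rw [hmem x, hmemr x]
            constructor
            · rintro ⟨⟨hxl, _⟩, hxn⟩; exact ⟨List.mem_cons_of_mem c hxl, hxn⟩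
            · rintro ⟨hxl, hxn⟩
              have hxc : x ≠ c := by rintro rfl; exact hc hxn
              rcases List.mem_cons.mp hxl with h | h
              · exact absurd h hxc
              · exact ⟨⟨h, hxc⟩, hxn⟩
          · rw [hstep, heq]
            refine Prod.ext ?_ ?_
            · show counts ++ ds.map (fun x => (r.count x : Int)) = counts ++ _
              congr 1
              refine List.map_congr_left ?_
              intro x hx
              have hxc : x ≠ c := ((hmemr x).mp ((hmem x).mp hx).1).2
              rw [hcnt x hxc]
            · show (if 'J' ∈ r then (r.count 'J' : Int) else j) = _
              have hJmem : 'J' ∈ r ↔ 'J' ∈ c :: t := by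
                rw [hmemr 'J', List.mem_cons]
                exact ⟨fun h => Or.inr h.1, fun h => ⟨h.resolve_left hJc, hJc⟩⟩
              by_cases hJl : 'J' ∈ c :: t
              · rw [if_pos (hJmem.mpr hJl), if_pos hJl, hcnt 'J' hJc]
              · rw [if_neg (fun h => hJl (hJmem.mp h)), if_neg hJl]

theorem pvStripGoSpec (l : List Char) (counts : List Int) (j : Int) :
    ∃ ds : List Char, ds.Nodup ∧ (∀ x, x ∈ ds ↔ x ∈ l ∧ x ∈ nonJChars) ∧
      stripGo l counts j
        = (counts ++ ds.map (fun c => (l.count c : Int)),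
           if 'J' ∈ l then (l.count 'J' : Int) else j) :=
  pvStripGoAux l.length l le_rfl counts j

-- A-side: Python's hand.count on a one-character needle is list count
theorem pvGoSingle (x : Char) : ∀ (cs : List Char) (acc : Nat),
    PySem.Chars.count.go [x] cs.length cs acc = acc + cs.count x := by
  intro cs
  induction cs with
  | nil => intro acc; simp [PySem.Chars.count.go]
  | cons h t ih =>
    intro acc
    rw [List.length_cons, PySem.Chars.count.go]
    by_cases hx : x = h
    · subst hx; simp [List.isPrefixOf, ih]; omega
    · simp [List.isPrefixOf, Ne.symm hx, hx, ih]

theorem pvCountSingle (cs : List Char) (x : Char) : PySem.Chars.count cs [x] = cs.count x := by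
  simp [PySem.Chars.count, pvGoSingle]

theorem pvStrCountChar (hand : String) (x : Char) :
    PySem.Str.count hand (String.ofList [x]) = hand.toList.count x := by
  show PySem.Chars.count hand.toList (String.ofList [x]).toList = _
  rw [String.toList_ofList, pvCountSingle]

-- A-side: the fold over the 13-card table, in closed form
theorem pvFoldA (hand : String) :
    cardStrings.foldl (fun (st : List Int × Int) c =>
        let count : Int := (PySem.Str.count hand c : Int)
        if c = "J" then (st.1, count)
        else if count ≠ 0 then (st.1 ++ [count], st.2) else st) ([], 0)
    = ((nonJChars.filter (fun ch => decide ((hand.toList.count ch : Int) ≠ 0))).map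
          (fun ch => (hand.toList.count ch : Int)),
       (hand.toList.count 'J' : Int)) := by
  rw [show cardStrings = ["A","K","Q","T","9","8","7","6","5","4","3","2"] ++ ["J"] from rfl,
      List.foldl_append]
  have h1 := PySem.List.foldl_congr_mem'
      (l := ["A","K","Q","T","9","8","7","6","5","4","3","2"])
      (f := fun (st : List Int × Int) c =>
        let count : Int := (PySem.Str.count hand c : Int)
        if c = "J" then (st.1, count)
        else if count ≠ 0 then (st.1 ++ [count], st.2) else st)
      (g := fun (st : List Int × Int) c =>
        (if (PySem.Str.count hand c : Int) ≠ 0 then st.1 ++ [(PySem.Str.count hand c : Int)] else st.1, st.2))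
      (init := (([], 0) : List Int × Int))
      (by intro c hc acc
          have hne : ¬ c = "J" := by fin_cases hc <;> decide
          simp only [hne, if_false]
          split <;> simp)
  rw [h1]
  have h2 := PySem.List.foldl_prod_mk
      (f := fun (l : List Int) c => if (PySem.Str.count hand c : Int) ≠ 0 then l ++ [(PySem.Str.count hand c : Int)] else l)
      (g := fun (j : Int) (_ : String) => j)
      (l := ["A","K","Q","T","9","8","7","6","5","4","3","2"]) (a := ([] : List Int)) (b := (0 : Int))
  rw [h2]
  rw [PySem.List.foldl_append_ite (p := fun c => (PySem.Str.count hand c : Int) ≠ 0)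
      (f := fun c => (PySem.Str.count hand c : Int)), PySem.List.foldl_ignore]
  have hmapped : (["A","K","Q","T","9","8","7","6","5","4","3","2"] : List String)
      = nonJChars.map (fun ch => String.ofList [ch]) := rfl
  rw [hmapped, List.filter_map, List.map_map]
  refine Prod.ext ?_ ?_
  · show [] ++ _ = _
    rw [List.nil_append]
    rw [List.map_congr_left (g := fun ch => (hand.toList.count ch : Int))
          (fun ch _ => by simp [Function.comp, pvCountSingle, PySem.Str.count])]
    congr 1
    refine List.filter_congr ?_
    intro ch _
    simp [Function.comp, PySem.Str.count, pvCountSingle]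
  · show (PySem.Str.count hand "J" : Int) = _
    rw [show ("J" : String) = String.ofList ['J'] from rfl, pvStrCountChar]

theorem pvMain (hand : String) : getCardCounts hand = getCardCounts_alt hand := by
  unfold getCardCounts getCardCounts_alt
  by_cases hJ : hand = "JJJJJ"
  · simp [hJ]
  · simp only [if_neg hJ]
    obtain ⟨ds, hnd, hmem, heq⟩ := pvStripGoSpec hand.toList [] 0
    have hjok : (if 'J' ∈ hand.toList then (hand.toList.count 'J' : Int) else (0 : Int)) = (hand.toList.count 'J' : Int) := by
      by_cases h : 'J' ∈ hand.toList
      · rw [if_pos h]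
      · rw [if_neg h, List.count_eq_zero_of_not_mem h]; rfl
    rw [pvFoldA hand, heq, hjok, List.nil_append]
    have hperm : ((nonJChars.filter (fun ch => decide ((hand.toList.count ch : Int) ≠ 0))).map
          (fun ch => (hand.toList.count ch : Int))).Perm (ds.map (fun c => (hand.toList.count c : Int))) := by
      refine List.Perm.map _ ?_
      rw [List.perm_ext_iff_of_nodup (List.Nodup.filter _ (by decide)) hnd]
      intro x
      rw [List.mem_filter, hmem x]
      constructor
      · rintro ⟨hx, hc⟩
        simp only [decide_eq_true_eq] at hc
        have hpos : 0 < hand.toList.count x := by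
          rcases Nat.eq_zero_or_pos (hand.toList.count x) with h0 | h0
          · exact absurd (by exact_mod_cast congrArg (Nat.cast (R := Int)) h0) hc
          · exact h0
        exact ⟨List.count_pos_iff.mp hpos, hx⟩
      · rintro ⟨hx, hc⟩
        refine ⟨hc, ?_⟩
        simp only [decide_eq_true_eq]
        have hpos : 0 < hand.toList.count x := List.count_pos_iff.mpr hx
        exact_mod_cast Nat.pos_iff_ne_zero.mp hpos
    have hsorted : PySem.List.sorted
          ((nonJChars.filter (fun ch => decide ((hand.toList.count ch : Int) ≠ 0))).map (fun ch => (hand.toList.count ch : Int)))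
          (fun x => x) true
        = PySem.List.sorted (ds.map (fun c => (hand.toList.count c : Int))) (fun x => x) true := by
      refine List.Perm.eq_of_pairwise (le := fun a b : Int => b ≤ a)
        (fun a b _ _ h1 h2 => le_antisymm h2 h1)
        (PySem.List.sorted_pairwise_rev _ _)
        (PySem.List.sorted_pairwise_rev _ _)
        ?_
      exact ((PySem.List.sorted_perm _ _ _).trans hperm).trans (PySem.List.sorted_perm _ _ _).symm
    rw [hsorted]

-- ===== VERDICT (by name: the statement is the Claim_ definition above) =====
theorem getCardCounts_spec : Claim_equal_getCardCounts := by
  intro hand _ _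
  exact pvMain hand
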